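-- pv_equiv track=rewrite | github.com/shauxya/PALB-2CSE24-2410031475 | Homework Assignment 9/Problem-59.py | max_visible_people
-- ===== SOURCE A (Python) =====
-- def max_visible_people(arr):
--     n = len(arr)
--
--     left = [-1] * n
--     right = [n] * n
--
--     stack = []
--
--     for i in range(n):
--         while stack and arr[stack[-1]] < arr[i]:
--             stack.pop()
--         left[i] = stack[-1] if stack else -1
--         stack.append(i)
--
--     stack = []
--
--     for i in range(n - 1, -1, -1):
--         while stack and arr[stack[-1]] < arr[i]:
--             stack.pop()
--         right[i] = stack[-1] if stack else n
--         stack.append(i)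
--
--     ans = 0
--
--     for i in range(n):
--         ans = max(ans, right[i] - left[i] + 1)
--
--     return ans
-- ===== SOURCE B (Python) =====
-- def max_visible_people(arr):
--     n = len(arr)
--     best = 0
--     for i in range(n):
--         left = -1
--         for j in range(i - 1, -1, -1):
--             if arr[j] >= arr[i]:
--                 left = j
--                 break
--         right = n
--         for k in range(i + 1, n):
--             if arr[k] >= arr[i]:
--                 right = k
--                 break
--         w = right - left + 1
--         if w > best:
--             best = w
--     return best
-- ===== Notes on version B (the rewrite author's own statement) =====
-- stated objective: simpler
-- what changed: Replaced the two monotonic stacks and the left/right index arrays with direct per-index scans: for each i scan left for the first element >= arr[i] and right likewise, keeping a running maximum.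
import Mathlib
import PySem

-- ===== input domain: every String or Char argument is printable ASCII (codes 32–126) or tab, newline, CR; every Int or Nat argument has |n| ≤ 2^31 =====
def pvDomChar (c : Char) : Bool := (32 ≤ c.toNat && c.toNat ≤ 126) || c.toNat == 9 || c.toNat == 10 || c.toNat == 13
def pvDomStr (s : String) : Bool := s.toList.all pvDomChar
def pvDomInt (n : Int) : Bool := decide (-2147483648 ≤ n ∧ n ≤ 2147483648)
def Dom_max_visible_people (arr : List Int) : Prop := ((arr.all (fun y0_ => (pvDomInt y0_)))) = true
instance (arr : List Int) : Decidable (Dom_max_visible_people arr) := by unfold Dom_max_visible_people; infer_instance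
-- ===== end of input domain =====

-- B replaces A's two monotonic stacks and index arrays with direct per-index left/right
-- scans (simpler: no stacks, no auxiliary arrays; not faster).

-- ===== PORT A =====
-- `while stack and arr[stack[-1]] < arr[i]: stack.pop()`; the stack holds indices,
-- head = top; `arr[j]` is exact as `arr.getD j 0` because every pushed index is < arr.length
def popA (arr : List Int) (x : Int) : List Nat → List Nat
  | [] => []
  | t :: s => if arr.getD t 0 < x then popA arr x s else t :: s

-- `stack[-1] if stack else d`
def topOr (s : List Nat) (d : Int) : Int :=
  match s with
  | [] => d
  | t :: _ => (t : Int)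

def max_visible_people (arr : List Int) : Int :=
  let n := arr.length
  -- first pass: left[i] = stack[-1] if stack else -1
  let lp := (List.range n).foldl
      (fun (st : List Nat × List Int) i =>
        let s := popA arr (arr.getD i 0) st.1
        (i :: s, st.2 ++ [topOr s (-1)])) ([], [])
  let left := lp.2
  -- second pass, i = n-1 … 0: right[i] = stack[-1] if stack else n
  -- (entries are prepended so `right` ends up in index order, as the Python array does)
  let rp := ((List.range n).reverse).foldl
      (fun (st : List Nat × List Int) i =>
        let s := popA arr (arr.getD i 0) st.1
        (i :: s, topOr s (n : Int) :: st.2)) ([], [])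
  let right := rp.2
  (List.range n).foldl (fun ans i => max ans (right.getD i 0 - left.getD i 0 + 1)) 0

-- ===== PORT B =====
-- `for j in range(i-1, -1, -1): if arr[j] >= arr[i]: left = j; break` (else left = -1)
def scanL (arr : List Int) (x : Int) : Nat → Int
  | 0 => -1
  | j + 1 => if x ≤ arr.getD j 0 then (j : Int) else scanL arr x j

-- `for k in range(i+1, n): if arr[k] >= arr[i]: right = k; break` (else right = n)
def scanR (arr : List Int) (x : Int) (n : Nat) (k : Nat) : Int :=
  if k < n then
    (if x ≤ arr.getD k 0 then (k : Int) else scanR arr x n (k + 1))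
  else (n : Int)
termination_by n - k

def max_visible_people_alt (arr : List Int) : Int :=
  let n := arr.length
  (List.range n).foldl
    (fun best i =>
      let x := arr.getD i 0
      let l := scanL arr x i
      let r := scanR arr x n (i + 1)
      let w := r - l + 1
      if best < w then w else best) 0

-- ===== PRECONDITION & SPEC =====
def Spec_max_visible_people (arr : List Int) (out : Int) : Prop := out = max_visible_people_alt arr
instance (arr : List Int) (out : Int) : Decidable (Spec_max_visible_people arr out) := by unfold Spec_max_visible_people; infer_instance

-- ===== CLAIM (what is proved, stated in full; the proofs are below) =====
def Claim_equal_max_visible_people : Prop := ∀ (arr : List Int), Dom_max_visible_people arr → Spec_max_visible_people arr (max_visible_people arr)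

-- ===== LEMMAS AND PROOFS =====

-- the left-pass stack after processing indices 0..i-1 (head = top = largest index):
-- exactly the j < i that no later k < i strictly exceeds
def stkL (arr : List Int) (i : Nat) : List Nat :=
  ((List.range i).filter (fun j => decide (∀ k < i, j < k → arr.getD k 0 ≤ arr.getD j 0))).reverse

-- the right-pass stack after processing indices n-1..i (head = top = smallest index)
def stkR (arr : List Int) (n i : Nat) : List Nat :=
  (List.range' i (n - i)).filter (fun j => decide (∀ k < j, i ≤ k → arr.getD k 0 ≤ arr.getD j 0))

-- on a stack whose values grow top-to-bottom, the pop loop is a filter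
theorem popA_eq_filter (arr : List Int) (x : Int) (l : List Nat)
    (h : l.Pairwise (fun u v => arr.getD u 0 ≤ arr.getD v 0)) :
    popA arr x l = l.filter (fun j => decide (x ≤ arr.getD j 0)) := by
  induction l with
  | nil => rfl
  | cons t s ih =>
    rcases List.pairwise_cons.mp h with ⟨ht, hs⟩
    by_cases hx : arr.getD t 0 < x
    · rw [show popA arr x (t :: s) = popA arr x s from by simp only [popA, if_pos hx],
        ih hs, List.filter_cons_of_neg (by simp only [decide_eq_true_eq]; omega)]
    · have hxt : x ≤ arr.getD t 0 := by omega
      rw [show popA arr x (t :: s) = t :: s from by simp only [popA, if_neg hx],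
        List.filter_cons_of_pos (by simpa using hxt), List.filter_eq_self.mpr]
      intro b hb
      simpa using le_trans hxt (ht b hb)


theorem pv_decide_and (q r : Prop) [Decidable q] [Decidable r] :
    decide (q ∧ r) = (decide q && decide r) := by
  by_cases hq : q <;> by_cases hr : r <;> simp [hq, hr]

theorem stkL_pairwise (arr : List Int) (i : Nat) :
    (stkL arr i).Pairwise (fun u v => arr.getD u 0 ≤ arr.getD v 0) := by
  unfold stkL
  rw [List.pairwise_reverse]
  have h₁ : ((List.range i).filter
      (fun j => decide (∀ k < i, j < k → arr.getD k 0 ≤ arr.getD j 0))).Pairwise (· < ·) :=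
    (List.pairwise_lt_range).filter _
  refine h₁.imp_of_mem ?_
  intro a b ha hb hlt
  have haP := List.of_mem_filter ha
  have hbR : b < i := List.mem_range.mp (List.mem_of_mem_filter hb)
  simp only [decide_eq_true_eq] at haP
  exact haP b hbR hlt

theorem stkR_pairwise (arr : List Int) (n i : Nat) :
    (stkR arr n i).Pairwise (fun u v => arr.getD u 0 ≤ arr.getD v 0) := by
  unfold stkR
  have h₁ : ((List.range' i (n - i)).filter
      (fun j => decide (∀ k < j, i ≤ k → arr.getD k 0 ≤ arr.getD j 0))).Pairwise (· < ·) :=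
    (List.pairwise_lt_range').filter _
  refine h₁.imp_of_mem ?_
  intro a b ha hb hlt
  have hbP := List.of_mem_filter hb
  have haM : i ≤ a := (List.mem_range'_1.mp (List.mem_of_mem_filter ha)).1
  simp only [decide_eq_true_eq] at hbP
  exact hbP a hlt haM

theorem stkL_step (arr : List Int) (i : Nat) :
    stkL arr (i + 1) = i :: popA arr (arr.getD i 0) (stkL arr i) := by
  rw [popA_eq_filter _ _ _ (stkL_pairwise arr i)]
  unfold stkL
  rw [List.filter_reverse, List.filter_filter, List.range_succ, List.filter_append,
    List.reverse_append]
  have hPi : (List.filter (fun j => decide (∀ k < i + 1, j < k → arr.getD k 0 ≤ arr.getD j 0)) [i])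
      = [i] := by
    simp only [List.filter_cons, List.filter_nil, decide_eq_true_eq]
    rw [if_pos]
    intro k hk hik
    omega
  rw [hPi]
  show i :: _ = i :: _
  congr 1
  rw [List.append_eq, List.nil_append]
  congr 1
  apply List.filter_congr
  intro j hj
  have hji : j < i := List.mem_range.mp hj
  rw [← pv_decide_and]
  apply decide_eq_decide.mpr
  constructor
  · intro h
    exact ⟨h i (by omega) hji, fun k hk hjk => h k (by omega) hjk⟩
  · intro ⟨h2, h1⟩ k hk hjk
    rcases Nat.lt_or_ge k i with hki | hki
    · exact h1 k hki hjk
    · have : k = i := by omega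
      subst this
      exact h2

theorem stkR_step (arr : List Int) (n i : Nat) (hi : i < n) :
    stkR arr n i = i :: popA arr (arr.getD i 0) (stkR arr n (i + 1)) := by
  rw [popA_eq_filter _ _ _ (stkR_pairwise arr n (i + 1))]
  unfold stkR
  rw [List.filter_filter, show n - i = (n - (i + 1)) + 1 by omega, List.range'_succ,
    List.filter_cons_of_pos (by simp only [decide_eq_true_eq]; intro k hk hik; omega)]
  congr 1
  apply List.filter_congr
  intro j hj
  have hji : i + 1 ≤ j := (List.mem_range'_1.mp hj).1
  rw [← pv_decide_and]
  apply decide_eq_decide.mpr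
  constructor
  · intro h
    exact ⟨h i (by omega) (by omega), fun k hk hik => h k hk (by omega)⟩
  · intro ⟨h2, h1⟩ k hk hik
    rcases Nat.lt_or_ge k (i + 1) with hki | hki
    · have : k = i := by omega
      subst this
      exact h2
    · exact h1 k hk hki

-- the head of the popped left stack is exactly B's leftward scan
theorem topL_aux (arr : List Int) (x : Int) (i : Nat) :
    ∀ m, m ≤ i → (∀ k, m ≤ k → k < i → arr.getD k 0 < x) →
    topOr (((List.range m).filter
        (fun j => decide (x ≤ arr.getD j 0)
          && decide (∀ k < i, j < k → arr.getD k 0 ≤ arr.getD j 0))).reverse) (-1) = scanL arr x m := by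
  intro m
  induction m with
  | zero => intro _ _; rfl
  | succ m ih =>
    intro hm hk
    rw [List.range_succ, List.filter_append, List.reverse_append]
    by_cases hx : x ≤ arr.getD m 0
    · have hP : ∀ k < i, m < k → arr.getD k 0 ≤ arr.getD m 0 := by
        intro k hk2 hmk
        exact le_trans (le_of_lt (hk k hmk hk2)) hx
      rw [show List.filter (fun j => decide (x ≤ arr.getD j 0)
          && decide (∀ k < i, j < k → arr.getD k 0 ≤ arr.getD j 0)) [m] = [m] from by
        simp only [List.filter_cons, List.filter_nil, Bool.and_eq_true, decide_eq_true_eq]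
        rw [if_pos ⟨hx, hP⟩]]
      rw [show scanL arr x (m + 1) = (m : Int) from by simp only [scanL, if_pos hx]]
      rfl
    · rw [show List.filter (fun j => decide (x ≤ arr.getD j 0)
          && decide (∀ k < i, j < k → arr.getD k 0 ≤ arr.getD j 0)) [m] = [] from by
        simp only [List.filter_cons, List.filter_nil, Bool.and_eq_true, decide_eq_true_eq]
        rw [if_neg]
        intro ⟨h2, _⟩
        exact hx h2]
      rw [show scanL arr x (m + 1) = scanL arr x m from by simp only [scanL, if_neg hx]]
      simp only [List.reverse_nil, List.nil_append]
      apply ih (by omega)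
      intro k hk1 hk2
      rcases Nat.lt_or_ge k (m + 1) with hkm | hkm
      · have : k = m := by omega
        subst this
        omega
      · exact hk k hkm hk2

theorem topL (arr : List Int) (i : Nat) :
    topOr (popA arr (arr.getD i 0) (stkL arr i)) (-1) = scanL arr (arr.getD i 0) i := by
  rw [popA_eq_filter _ _ _ (stkL_pairwise arr i)]
  unfold stkL
  rw [List.filter_reverse, List.filter_filter]
  exact topL_aux arr (arr.getD i 0) i i le_rfl (fun k hk1 hk2 => absurd hk1 (by omega))

-- the head of the popped right stack is exactly B's rightward scan
theorem topR_aux (arr : List Int) (x : Int) (n i : Nat) :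
    ∀ d m, n - m = d → i ≤ m → (∀ k, i ≤ k → k < m → arr.getD k 0 < x) →
    topOr ((List.range' m (n - m)).filter
        (fun j => decide (x ≤ arr.getD j 0)
          && decide (∀ k < j, i ≤ k → arr.getD k 0 ≤ arr.getD j 0))) (n : Int) = scanR arr x n m := by
  intro d
  induction d with
  | zero =>
    intro m hd _ _
    have hnm : ¬ m < n := by omega
    rw [hd, scanR.eq_def]
    simp only [List.range'_zero, List.filter_nil, if_neg hnm]
    rfl
  | succ d ihd =>
    intro m hd hm hk
    have hmn : m < n := by omega
    rw [hd, List.range'_succ, scanR.eq_def, if_pos hmn]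
    by_cases hx : x ≤ arr.getD m 0
    · have hP : ∀ k < m, i ≤ k → arr.getD k 0 ≤ arr.getD m 0 := by
        intro k hk2 hik
        exact le_trans (le_of_lt (hk k hik hk2)) hx
      have hkeep : (decide (x ≤ arr.getD m 0)
          && decide (∀ k < m, i ≤ k → arr.getD k 0 ≤ arr.getD m 0)) = true := by
        simp only [Bool.and_eq_true, decide_eq_true_eq]
        exact ⟨hx, hP⟩
      simp only [List.filter_cons]
      rw [if_pos hkeep, if_pos hx]
      rfl
    · have hdrop : ¬ ((decide (x ≤ arr.getD m 0)
          && decide (∀ k < m, i ≤ k → arr.getD k 0 ≤ arr.getD m 0)) = true) := by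
        simp only [Bool.and_eq_true, decide_eq_true_eq]
        intro ⟨h2, _⟩
        exact hx h2
      have hrw : List.range' (m + 1) d = List.range' (m + 1) (n - (m + 1)) := by
        congr 1
        omega
      simp only [List.filter_cons]
      rw [if_neg hdrop, if_neg hx, hrw]
      apply ihd (m + 1) (by omega) (by omega)
      intro k hk1 hk2
      rcases Nat.lt_or_ge k m with hkm | hkm
      · exact hk k hk1 hkm
      · have hke : k = m := by omega
        rw [hke]
        omega

theorem topR (arr : List Int) (n i : Nat) :
    topOr (popA arr (arr.getD i 0) (stkR arr n (i + 1))) (n : Int)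
      = scanR arr (arr.getD i 0) n (i + 1) := by
  rw [popA_eq_filter _ _ _ (stkR_pairwise arr n (i + 1))]
  unfold stkR
  rw [List.filter_filter]
  exact topR_aux arr (arr.getD i 0) n (i + 1) (n - (i + 1)) (i + 1) rfl le_rfl
    (fun k hk1 hk2 => absurd hk1 (by omega))

-- the left pass computes (stack, map of B's left scans)
theorem leftFold (arr : List Int) (m : Nat) :
    (List.range m).foldl
      (fun (st : List Nat × List Int) i =>
        (i :: popA arr (arr.getD i 0) st.1,
          st.2 ++ [topOr (popA arr (arr.getD i 0) st.1) (-1)])) ([], [])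
      = (stkL arr m, (List.range m).map (fun i => scanL arr (arr.getD i 0) i)) := by
  induction m with
  | zero => simp [stkL]
  | succ m ih =>
    rw [List.range_succ, List.foldl_append, List.map_append, ih]
    simp only [List.foldl_cons, List.foldl_nil, List.map_cons, List.map_nil]
    rw [stkL_step arr m, topL arr m]

-- the right pass computes (stack, map of B's right scans)
theorem rightFold (arr : List Int) (n : Nat) :
    ∀ d m, n - m = d →
    ((List.range' m (n - m)).reverse).foldl
      (fun (st : List Nat × List Int) i =>
        (i :: popA arr (arr.getD i 0) st.1,
          topOr (popA arr (arr.getD i 0) st.1) (n : Int) :: st.2)) ([], [])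
      = (stkR arr n m, (List.range' m (n - m)).map
          (fun i => scanR arr (arr.getD i 0) n (i + 1))) := by
  intro d
  induction d with
  | zero =>
    intro m hd
    rw [hd]
    simp [stkR, hd]
  | succ d ihd =>
    intro m hd
    have hmn : m < n := by omega
    have hnd : n - (m + 1) = d := by omega
    rw [hd, List.range'_succ, List.reverse_cons, List.foldl_append,
      show List.range' (m + 1) d = List.range' (m + 1) (n - (m + 1)) from by rw [hnd],
      ihd (m + 1) hnd]
    simp only [List.foldl_cons, List.foldl_nil, List.map_cons]
    rw [stkR_step arr n m hmn, topR arr n m]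

theorem getD_map_range (g : Nat → Int) (n i : Nat) (hi : i < n) :
    ((List.range n).map g).getD i 0 = g i := by
  rw [List.getD_eq_getElem?_getD, List.getElem?_map, List.getElem?_range hi]
  rfl

-- ===== VERDICT (by name: the statement is the Claim_ definition above) =====
theorem max_visible_people_spec : Claim_equal_max_visible_people := by
  intro arr _
  show max_visible_people arr = max_visible_people_alt arr
  simp only [max_visible_people, max_visible_people_alt]
  rw [leftFold arr arr.length,
    show (List.range arr.length).reverse
        = (List.range' 0 (arr.length - 0)).reverse from by
      rw [Nat.sub_zero, List.range_eq_range'],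
    rightFold arr arr.length (arr.length - 0) 0 rfl,
    Nat.sub_zero, ← List.range_eq_range']
  apply PySem.List.foldl_congr_mem
  intro acc i hi
  have hin : i < arr.length := List.mem_range.mp hi
  rw [getD_map_range _ _ _ hin, getD_map_range _ _ _ hin]
  show max acc _ = if acc < _ then _ else acc
  rw [max_def]
  split_ifs <;> omega
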